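-- pv_equiv track=rewrite | github.com/Dolphin2333/FinQA-with-QSTAR | src/load_data.py | _program_tokenization
-- ===== SOURCE A (Python) =====
-- from typing import Iterable, List, Sequence
--
-- def _program_tokenization(program_text: str) -> List[str]:
--     """Convert the FinQA program string into a list of tokens (copy of official logic)."""
--     program_text = program_text or ""
--     tokens = []
--     current = ""
--
--     for char in program_text.split(", "):
--         cur_tok = ""
--         for c in char:
--             if c == ")":
--                 if cur_tok:
--                     tokens.append(cur_tok)
--                     cur_tok = ""
--             cur_tok += c
--             if c in ("(", ")"):
--                 tokens.append(cur_tok)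
--                 cur_tok = ""
--         if cur_tok:
--             tokens.append(cur_tok)
--     tokens.append("EOF")
--     return tokens
-- ===== SOURCE B (Python) =====
-- def _toks(s):
--     """Tokens of one comma-free piece: ')' and '(' are flush points;
--     a maximal run of non-paren chars plus a following '(' is one token."""
--     if not s:
--         return []
--     if s[0] == ')':
--         return [')'] + _toks(s[1:])
--     if s[0] == '(':
--         return ['('] + _toks(s[1:])
--     i = 1
--     while i < len(s) and s[i] not in '()':
--         i += 1
--     if i < len(s) and s[i] == '(':
--         return [s[:i + 1]] + _toks(s[i + 1:])
--     return [s[:i]] + _toks(s[i:])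
--
--
-- def _program_tokenization(program_text):
--     program_text = program_text or ""
--     tokens = []
--     for piece in program_text.split(", "):
--         tokens.extend(_toks(piece))
--     tokens.append("EOF")
--     return tokens
-- ===== Notes on version B (the rewrite author's own statement) =====
-- stated objective: alternative
-- what changed: Replaces the per-character state machine (cur_tok accumulator with flush rules) by a recursive span tokenizer that consumes a whole maximal non-paren run (plus an optional trailing '(') or a single paren per step.
import Mathlib
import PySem

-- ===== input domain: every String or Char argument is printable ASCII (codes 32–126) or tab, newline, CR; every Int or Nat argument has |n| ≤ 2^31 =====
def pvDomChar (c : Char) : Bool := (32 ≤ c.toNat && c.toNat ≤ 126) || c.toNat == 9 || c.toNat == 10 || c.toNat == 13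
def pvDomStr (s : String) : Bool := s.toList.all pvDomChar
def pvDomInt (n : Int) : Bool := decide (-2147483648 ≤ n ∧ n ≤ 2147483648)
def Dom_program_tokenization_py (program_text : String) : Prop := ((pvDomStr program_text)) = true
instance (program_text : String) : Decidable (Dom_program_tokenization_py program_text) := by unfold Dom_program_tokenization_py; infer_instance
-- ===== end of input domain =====

-- B replaces A's per-character state machine by a recursive span tokenizer (alternative, same cost).

-- ===== PORT A =====
-- one step of A's inner character loop: state = (tokens so far, cur_tok)
def aStep (p : List String × List Char) (c : Char) : List String × List Char :=
  let p := if c = ')' then (if p.2 ≠ [] then (p.1 ++ [String.ofList p.2], ([] : List Char)) else p) else p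
  let cur := p.2 ++ [c]
  if c = '(' ∨ c = ')' then (p.1 ++ [String.ofList cur], ([] : List Char)) else (p.1, cur)

-- A's inner loop over one ', '-separated piece, plus the trailing flush
def aInner (tokens : List String) (piece : List Char) : List String :=
  let st := piece.foldl aStep (tokens, [])
  if st.2 ≠ [] then st.1 ++ [String.ofList st.2] else st.1

def program_tokenization_py (program_text : String) : List String :=
  let pt := if program_text = "" then "" else program_text   -- program_text or ""
  ((PySem.Chars.splitOn pt.toList ", ".toList).foldl (fun toks piece => aInner toks piece) []) ++ ["EOF"]

-- ===== PORT B =====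
-- "not a paren" (B's `s[i] not in '()'`)
def npChar (c : Char) : Bool := c ≠ '(' && c ≠ ')'

-- B's _toks: consume one paren, or a maximal non-paren run (+ optional trailing '(') per step
def bToks : List Char → List String
  | [] => []
  | c :: rest =>
    if c = ')' then ")" :: bToks rest
    else if c = '(' then "(" :: bToks rest
    else
      match h : rest.dropWhile npChar with
      | '(' :: rest'' => String.ofList (c :: rest.takeWhile npChar ++ ['(']) :: bToks rest''
      | r => String.ofList (c :: rest.takeWhile npChar) :: bToks r
termination_by l => l.length
decreasing_by
  · simp
  · simp
  · have h1 : (rest.dropWhile npChar).length ≤ rest.length := List.length_dropWhile_le npChar rest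
    rw [h] at h1
    simp only [List.length_cons] at h1 ⊢
    omega
  · have h1 : (rest.dropWhile npChar).length ≤ rest.length := List.length_dropWhile_le npChar rest
    rw [h] at h1
    simp only [List.length_cons] at h1 ⊢
    omega

def program_tokenization_py_alt (program_text : String) : List String :=
  let pt := if program_text = "" then "" else program_text   -- program_text or ""
  ((PySem.Chars.splitOn pt.toList ", ".toList).foldl (fun toks piece => toks ++ bToks piece) []) ++ ["EOF"]

-- ===== PRECONDITION & SPEC =====
def Spec_program_tokenization_py (program_text : String) (out : List String) : Prop := out = program_tokenization_py_alt program_text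
instance (program_text : String) (out : List String) : Decidable (Spec_program_tokenization_py program_text out) := by unfold Spec_program_tokenization_py; infer_instance

-- ===== CLAIM (what is proved, stated in full; the proofs are below) =====
def Claim_equal_program_tokenization_py : Prop := ∀ (program_text : String), Dom_program_tokenization_py program_text → Spec_program_tokenization_py program_text (program_tokenization_py program_text)

-- ===== LEMMAS AND PROOFS =====

theorem takeWhile_np_append (t cs : List Char) (x : Char) (hx : npChar x = false)
    (h : ∀ c ∈ t, npChar c = true) : (t ++ x :: cs).takeWhile npChar = t := by
  induction t with
  | nil => simp [hx]
  | cons d tl ih =>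
    simp [h d (by simp)]
    exact ih (fun c hc => h c (by simp [hc]))

theorem dropWhile_np_append (t cs : List Char) (x : Char) (hx : npChar x = false)
    (h : ∀ c ∈ t, npChar c = true) : (t ++ x :: cs).dropWhile npChar = x :: cs := by
  induction t with
  | nil => simp [hx]
  | cons d tl ih =>
    simp [h d (by simp)]
    exact ih (fun c hc => h c (by simp [hc]))

theorem np_ne (c : Char) (h : npChar c = true) : c ≠ ')' ∧ c ≠ '(' := by
  simp [npChar] at h; exact ⟨h.2, h.1⟩

theorem bToks_np_all (cur : List Char) (h : ∀ c ∈ cur, npChar c = true) :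
    bToks cur = if cur = [] then [] else [String.ofList cur] := by
  cases cur with
  | nil => simp [bToks]
  | cons d t =>
    have hd := np_ne d (h d (by simp))
    have ht : ∀ c ∈ t, npChar c = true := fun c hc => h c (by simp [hc])
    have hdrop : t.dropWhile npChar = [] := List.dropWhile_eq_nil_iff.2 (fun x hx => ht x hx)
    have htake : t.takeWhile npChar = t := List.takeWhile_eq_self_iff.2 (fun x hx => ht x hx)
    simp [bToks, hd.1, hd.2, hdrop, htake]

theorem bToks_np_close (cur cs : List Char) (h : ∀ c ∈ cur, npChar c = true) :
    bToks (cur ++ ')' :: cs) = (if cur = [] then [] else [String.ofList cur]) ++ ")" :: bToks cs := by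
  cases cur with
  | nil => simp [bToks]
  | cons d t =>
    have hd := np_ne d (h d (by simp))
    have ht : ∀ c ∈ t, npChar c = true := fun c hc => h c (by simp [hc])
    have hdrop := dropWhile_np_append t cs ')' (by simp [npChar]) ht
    have htake := takeWhile_np_append t cs ')' (by simp [npChar]) ht
    simp [bToks, hd.1, hd.2, hdrop, htake]

theorem bToks_np_open (cur cs : List Char) (h : ∀ c ∈ cur, npChar c = true) :
    bToks (cur ++ '(' :: cs) = String.ofList (cur ++ ['(']) :: bToks cs := by
  cases cur with
  | nil => simp [bToks]
  | cons d t =>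
    have hd := np_ne d (h d (by simp))
    have ht : ∀ c ∈ t, npChar c = true := fun c hc => h c (by simp [hc])
    have hdrop := dropWhile_np_append t cs '(' (by simp [npChar]) ht
    have htake := takeWhile_np_append t cs '(' (by simp [npChar]) ht
    simp [bToks, hd.1, hd.2, htake]
    split <;> simp_all

theorem inner_eq_aux (piece : List Char) : ∀ (toks : List String) (cur : List Char),
    (∀ c ∈ cur, npChar c = true) →
    (let st := piece.foldl aStep (toks, cur);
     if st.2 ≠ [] then st.1 ++ [String.ofList st.2] else st.1) = toks ++ bToks (cur ++ piece) := by
  induction piece with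
  | nil =>
    intro toks cur h
    simp only [List.foldl_nil, List.append_nil, bToks_np_all cur h]
    by_cases hc : cur = [] <;> simp [hc]
  | cons c cs ih =>
    intro toks cur h
    by_cases hcl : c = ')'
    · subst hcl
      have hstep : aStep (toks, cur) ')' =
          ((if cur = [] then toks else toks ++ [String.ofList cur]) ++ [")"], []) := by
        by_cases hc : cur = [] <;> simp [aStep, hc]
      rw [List.foldl_cons, hstep, ih _ [] (by simp), bToks_np_close cur cs h]
      by_cases hc : cur = [] <;> simp [hc]
    · by_cases hop : c = '('
      · subst hop
        have hstep : aStep (toks, cur) '(' = (toks ++ [String.ofList (cur ++ ['('])], []) := by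
          simp [aStep]
        rw [List.foldl_cons, hstep, ih _ [] (by simp), bToks_np_open cur cs h]
        simp
      · have hnp : npChar c = true := by simp [npChar, hcl, hop]
        have hstep : aStep (toks, cur) c = (toks, cur ++ [c]) := by
          simp [aStep, hcl, hop]
        have hall : ∀ x ∈ cur ++ [c], npChar x = true := by
          intro x hx
          rcases List.mem_append.1 hx with h1 | h1
          · exact h x h1
          · simp at h1; subst h1; exact hnp
        rw [List.foldl_cons, hstep, ih toks (cur ++ [c]) hall]
        simp

theorem aInner_eq (toks : List String) (piece : List Char) :
    aInner toks piece = toks ++ bToks piece := by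
  have := inner_eq_aux piece toks [] (by simp)
  simpa [aInner] using this

theorem foldl_eq (pieces : List (List Char)) : ∀ (acc : List String),
    pieces.foldl (fun toks piece => aInner toks piece) acc
      = pieces.foldl (fun toks piece => toks ++ bToks piece) acc := by
  induction pieces with
  | nil => intro acc; rfl
  | cons p ps ih => intro acc; rw [List.foldl_cons, List.foldl_cons, aInner_eq]; exact ih _

-- ===== VERDICT (by name: the statement is the Claim_ definition above) =====
theorem program_tokenization_py_spec : Claim_equal_program_tokenization_py := by
  intro s _
  unfold Spec_program_tokenization_py program_tokenization_py program_tokenization_py_alt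
  exact congrArg (· ++ ["EOF"]) (foldl_eq _ _)
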